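-- pv_equiv track=rewrite | github.com/rickyurvinaunab/INTRO_11285 | clases/repaso_I2/p1_strings_wordccA.py | parentesis
-- ===== SOURCE A (Python) =====
-- def parentesis(texto, indice):
--     texto_cortado = texto[:indice]  # cortamos el texto hasta la posicion indicada (no incluido)
--     indice_p = 0  # variable que guardara la posicion encontrada; inicia en 0 por defecto
--     # Recorremos cada indice del texto_cortado para poder obtener la posicion numerica
--     for indice_t in range(len(texto_cortado)):
--         letra = texto_cortado[indice_t]  # obtenemos el caracter en la posicion actual
--         # Si el caracter es un parentesis abierto, actualizamos indice_p
--         # De esta forma vamos registrando la ultima posicion donde aparece '('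
--         if letra == "(":
--             indice_p = indice_t
--     # Al salir del bucle, indice_p contiene la ultima posicion de '(' ,
--     # o 0 si no se encontro ninguno.
--     return indice_p
-- ===== SOURCE B (Python) =====
-- def parentesis(texto, indice):
--     texto_cortado = texto[:indice]
--     # scan backwards: the first '(' found from the right is the last one overall
--     for i in range(len(texto_cortado) - 1, -1, -1):
--         if texto_cortado[i] == "(":
--             return i
--     return 0
-- ===== Notes on version B (the rewrite author's own statement) =====
-- stated objective: alternative
-- what changed: Replaces A's forward scan that keeps overwriting an accumulator with a reverse scan that returns immediately at the first '(' seen from the right (no accumulator), falling back to 0 after the loop.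
import Mathlib
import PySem

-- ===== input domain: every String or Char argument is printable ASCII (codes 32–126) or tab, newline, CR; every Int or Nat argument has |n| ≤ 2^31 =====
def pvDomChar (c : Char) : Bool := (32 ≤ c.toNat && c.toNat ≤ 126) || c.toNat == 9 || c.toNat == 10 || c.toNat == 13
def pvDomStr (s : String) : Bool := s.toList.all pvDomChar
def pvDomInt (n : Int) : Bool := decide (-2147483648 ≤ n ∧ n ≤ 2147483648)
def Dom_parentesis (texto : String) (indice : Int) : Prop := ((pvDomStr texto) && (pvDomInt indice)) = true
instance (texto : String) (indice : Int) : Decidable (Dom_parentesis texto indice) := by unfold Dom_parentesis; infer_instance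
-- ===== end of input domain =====

-- B replaces A's forward scan with accumulator by a reverse scan returning at the first '(' from the right.
-- ===== PORT A =====
def parentesis (texto : String) (indice : Int) : Int :=
  let texto_cortado := PySem.List.slice texto.toList none (some indice)
  (List.range texto_cortado.length).foldl
    (fun indice_p indice_t =>
      let letra := texto_cortado.getD indice_t ' '  -- index always in range
      if letra = '(' then (indice_t : Int) else indice_p)
    0

-- ===== PORT B =====
-- loop `for i in range(len(cut)-1, -1, -1): if cut[i] == '(': return i` / `return 0`
def parentesisAltLoop (cut : List Char) : Nat → Int
  | 0 => 0
  | Nat.succ i => if cut.getD i ' ' = '(' then (i : Int) else parentesisAltLoop cut i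

def parentesis_alt (texto : String) (indice : Int) : Int :=
  let texto_cortado := PySem.List.slice texto.toList none (some indice)
  parentesisAltLoop texto_cortado texto_cortado.length

-- ===== PRECONDITION & SPEC =====
def Spec_parentesis (texto : String) (indice : Int) (out : Int) : Prop := out = parentesis_alt texto indice
instance (texto : String) (indice : Int) (out : Int) : Decidable (Spec_parentesis texto indice out) := by unfold Spec_parentesis; infer_instance

-- ===== CLAIM (what is proved, stated in full; the proofs are below) =====
def Claim_equal_parentesis : Prop := ∀ (texto : String) (indice : Int), Dom_parentesis texto indice → Spec_parentesis texto indice (parentesis texto indice)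

-- ===== LEMMAS AND PROOFS =====

-- ===== VERDICT (by name: the statement is the Claim_ definition above) =====
theorem loop_eq (cut : List Char) (n : Nat) :
    (List.range n).foldl
      (fun indice_p indice_t =>
        let letra := cut.getD indice_t ' '
        if letra = '(' then (indice_t : Int) else indice_p) 0
      = parentesisAltLoop cut n := by
  induction n with
  | zero => simp [parentesisAltLoop]
  | succ n ih =>
    simp [List.range_succ, List.foldl_append, parentesisAltLoop]
    split <;> simp_all

theorem parentesis_spec : Claim_equal_parentesis := by
  intro texto indice _
  unfold Spec_parentesis parentesis parentesis_alt
  exact loop_eq _ _
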